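-- pv_equiv track=rewrite | github.com/nagasawayuki/spatialId_view | BST_ID/bst_id/logic.py | build_bst_id
-- ===== SOURCE A (Python) =====
-- from typing import Tuple, Dict
--
-- def build_bst_id(flags: int, zooms: Dict[str, int], values: Dict[str, int]) -> int:
--     axes = ['x', 'y', 'f', 't']
--     result = flags
--     for axis in axes:
--         if (flags >> (3 - axes.index(axis))) & 1:
--             result = (result << 5) | (zooms[axis] - 1)
--     for axis in axes:
--         if (flags >> (3 - axes.index(axis))) & 1:
--             z = zooms[axis]
--             result = (result << z) | values[axis]
--     return result
-- ===== SOURCE B (Python) =====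
-- def build_bst_id(flags, zooms, values):
--     # Divide-and-conquer: each active axis contributes two bit fields (a 5-bit
--     # zoom header and a zoom-wide value); pack merges the field list as a
--     # balanced tree, combining halves with one shift-and-OR per node.
--     axes = ['x', 'y', 'f', 't']
--     active = [a for i, a in enumerate(axes) if (flags >> (3 - i)) & 1]
--     fields = [(zooms[a] - 1, 5) for a in active] + [(values[a], zooms[a]) for a in active]
--
--     def pack(fs):
--         if not fs:
--             return (0, 0)
--         if len(fs) == 1:
--             return fs[0]
--         mid = len(fs) // 2
--         hv, hw = pack(fs[:mid])
--         lv, lw = pack(fs[mid:])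
--         return ((hv << lw) | lv, hw + lw)
--
--     v, w = pack(fields)
--     return (flags << w) | v
-- ===== Notes on version B (the rewrite author's own statement) =====
-- stated objective: alternative
-- what changed: A accumulates one running integer with sequential shift-then-OR over two axis loops (recomputing axes.index in each test); B builds the list of (field value, bit width) pairs once and packs it with a recursive divide-and-conquer merge (split the field list in half, pack each half, join with a single shift-and-OR), finally attaching flags above the packed total width.
import Mathlib
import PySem

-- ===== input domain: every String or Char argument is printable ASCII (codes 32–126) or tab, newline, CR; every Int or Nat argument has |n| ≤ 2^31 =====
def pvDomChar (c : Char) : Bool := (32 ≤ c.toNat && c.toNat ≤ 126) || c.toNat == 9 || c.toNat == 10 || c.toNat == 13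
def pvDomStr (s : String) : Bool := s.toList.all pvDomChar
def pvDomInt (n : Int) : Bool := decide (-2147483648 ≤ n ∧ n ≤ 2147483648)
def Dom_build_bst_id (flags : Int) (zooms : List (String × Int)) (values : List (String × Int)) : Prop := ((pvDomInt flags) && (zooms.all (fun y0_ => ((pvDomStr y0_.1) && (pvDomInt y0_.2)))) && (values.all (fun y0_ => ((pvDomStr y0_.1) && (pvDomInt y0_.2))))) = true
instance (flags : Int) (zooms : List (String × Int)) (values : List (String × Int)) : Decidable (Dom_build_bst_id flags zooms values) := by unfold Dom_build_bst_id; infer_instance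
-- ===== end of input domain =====

-- B replaces A's sequential shift-then-OR accumulation by building the (field value, bit width)
-- list once and packing it with a recursive divide-and-conquer merge; same return value.

-- ===== PORT A =====
-- A's two loops over the literal axis list; the bit test recomputes axes.index(axis) each time.
def build_bst_id (flags : Int) (zooms : List (String × Int)) (values : List (String × Int)) : Int :=
  let axes : List String := ["x", "y", "f", "t"]
  let r1 := axes.foldl (fun result axis =>
    if PySem.Int.band (flags >>> (3 - ((PySem.List.index? axes axis).getD 0))) 1 ≠ 0 then
      PySem.Int.bor (result <<< 5) (PySem.Dict.getD ⟨zooms⟩ axis 0 - 1)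
    else result) flags
  axes.foldl (fun result axis =>
    if PySem.Int.band (flags >>> (3 - ((PySem.List.index? axes axis).getD 0))) 1 ≠ 0 then
      let z := PySem.Dict.getD ⟨zooms⟩ axis 0
      PySem.Int.bor (result <<< z.toNat) (PySem.Dict.getD ⟨values⟩ axis 0)
    else result) r1

-- ===== PORT B =====
-- fs[:mid] / fs[mid:] with 0 ≤ mid ≤ len are exactly List.take / List.drop.
def pvPack : List (Int × Int) → Int × Int
  | [] => (0, 0)
  | [p] => p
  | a :: b :: rest =>
    let fs := a :: b :: rest
    let mid := fs.length / 2
    let h := pvPack (fs.take mid)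
    let l := pvPack (fs.drop mid)
    (PySem.Int.bor (h.1 <<< l.2.toNat) l.1, h.2 + l.2)
  termination_by fs => fs.length
  decreasing_by
  · simp; omega
  · simp; omega

def build_bst_id_alt (flags : Int) (zooms : List (String × Int)) (values : List (String × Int)) : Int :=
  let axes : List String := ["x", "y", "f", "t"]
  let active := ((PySem.List.enumerate axes).filter
    (fun p => PySem.Int.band (flags >>> (3 - p.1).toNat) 1 ≠ 0)).map Prod.snd
  let fields := active.map (fun a => (PySem.Dict.getD ⟨zooms⟩ a 0 - 1, (5 : Int)))
             ++ active.map (fun a => (PySem.Dict.getD ⟨values⟩ a 0, PySem.Dict.getD ⟨zooms⟩ a 0))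
  let vw := pvPack fields
  PySem.Int.bor (flags <<< vw.2.toNat) vw.1

-- ===== PRECONDITION & SPEC =====
-- Pre_ excludes exactly the inputs on which A raises: a flag-active axis whose key is missing from
-- zooms or values (KeyError) or whose zoom is negative (ValueError on the negative shift count).
def pvAxisOK (flags : Int) (zooms : List (String × Int)) (values : List (String × Int))
    (k : Nat) (a : String) : Prop :=
  PySem.Int.band (flags >>> k) 1 ≠ 0 →
    (PySem.Dict.get? ⟨zooms⟩ a).isSome ∧ 0 ≤ PySem.Dict.getD ⟨zooms⟩ a 0
      ∧ (PySem.Dict.get? ⟨values⟩ a).isSome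

def Pre_build_bst_id (flags : Int) (zooms : List (String × Int)) (values : List (String × Int)) : Prop :=
  pvAxisOK flags zooms values 3 "x" ∧ pvAxisOK flags zooms values 2 "y"
    ∧ pvAxisOK flags zooms values 1 "f" ∧ pvAxisOK flags zooms values 0 "t"

instance (flags : Int) (zooms : List (String × Int)) (values : List (String × Int)) :
    Decidable (Pre_build_bst_id flags zooms values) := by unfold Pre_build_bst_id pvAxisOK; infer_instance

def pvWitness_build_bst_id : Int × (List (String × Int)) × (List (String × Int)) :=
  (9, [("x", 3), ("t", 2)], [("x", 5), ("t", 1)])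

def Spec_build_bst_id (flags : Int) (zooms : List (String × Int)) (values : List (String × Int)) (out : Int) : Prop := out = build_bst_id_alt flags zooms values
instance (flags : Int) (zooms : List (String × Int)) (values : List (String × Int)) (out : Int) : Decidable (Spec_build_bst_id flags zooms values out) := by unfold Spec_build_bst_id; infer_instance

-- ===== CLAIM (what is proved, stated in full; the proofs are below) =====
def Claim_equal_build_bst_id : Prop := ∀ (flags : Int) (zooms : List (String × Int)) (values : List (String × Int)), Dom_build_bst_id flags zooms values → Pre_build_bst_id flags zooms values → Spec_build_bst_id flags zooms values (build_bst_id flags zooms values)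

-- ===== LEMMAS AND PROOFS =====
theorem natMulPow_lor (x y n : Nat) : (x ||| y) * 2^n = x * 2^n ||| y * 2^n := by
  apply Nat.eq_of_testBit_eq; intro j
  simp only [Nat.mul_comm _ (2^n), Nat.testBit_two_pow_mul, Nat.testBit_lor]
  by_cases h : n ≤ j <;> simp [h]

theorem natMulPow_mask_land (x y n : Nat) :
    (x * 2^n + (2^n - 1)) &&& (y * 2^n) = (x &&& y) * 2^n := by
  apply Nat.eq_of_testBit_eq; intro j
  have hb : 2^n - 1 < 2^n := by have := Nat.two_pow_pos n; omega
  simp only [Nat.mul_comm _ (2^n), Nat.testBit_land, Nat.testBit_two_pow_mul,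
    Nat.testBit_two_pow_mul_add _ hb, Nat.testBit_two_pow_sub_one]
  by_cases h : j < n
  · simp [h, Nat.not_le.mpr h]
  · simp [h, Nat.not_lt.mp h]

theorem natMulPow_mask_land_mask (x y n : Nat) :
    (x * 2^n + (2^n - 1)) &&& (y * 2^n + (2^n - 1)) = (x &&& y) * 2^n + (2^n - 1) := by
  apply Nat.eq_of_testBit_eq; intro j
  have hb : 2^n - 1 < 2^n := by have := Nat.two_pow_pos n; omega
  simp only [Nat.mul_comm _ (2^n), Nat.testBit_land,
    Nat.testBit_two_pow_mul_add _ hb, Nat.testBit_two_pow_sub_one]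
  by_cases h : j < n <;> simp [h]

theorem int_bor_shl (a b : Int) (n : Nat) :
    (PySem.Int.bor a b) <<< n = PySem.Int.bor (a <<< n) (b <<< n) := by
  have h1 : (1:Nat) ≤ 2^n := Nat.one_le_two_pow
  have hp : ((2:Int)^n) = ((2^n : Nat) : Int) := by push_cast; ring
  have hpos : (0:Int) < ((2^n : Nat) : Int) := by exact_mod_cast Nat.two_pow_pos n
  have hmul : ∀ x : Int, 0 ≤ x → (x * ((2^n:Nat):Int)).toNat = x.toNat * 2^n := by
    intro x hx
    rw [← Int.toNat_of_nonneg hx, ← Nat.cast_mul, Int.toNat_natCast, Int.toNat_natCast]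
  have hneg : ∀ x : Int, x < 0 → (-(x * ((2^n:Nat):Int)) - 1).toNat = (-x-1).toNat * 2^n + (2^n - 1) := by
    intro x hx
    obtain ⟨m, hm⟩ : ∃ m : Nat, x = -(m:Int) - 1 := ⟨(-x-1).toNat, by omega⟩
    subst hm
    have h2 : (-(-(m:Int) - 1) - 1) = (m:Int) := by ring
    rw [h2, Int.toNat_natCast]
    have : -((-(m:Int) - 1) * ((2^n:Nat):Int)) - 1 = ((m * 2^n + (2^n - 1) : Nat) : Int) := by
      push_cast [Nat.cast_sub h1]; ring
    rw [this, Int.toNat_natCast]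
  simp only [Int.shiftLeft_eq, hp, PySem.Int.bor]
  by_cases ha : 0 ≤ a <;> by_cases hb : 0 ≤ b
  · rw [if_pos ha, if_pos hb, if_pos (mul_nonneg ha hpos.le), if_pos (mul_nonneg hb hpos.le),
      hmul a ha, hmul b hb, ← natMulPow_lor]
    push_cast; ring
  · have hb' : b < 0 := by omega
    rw [if_pos ha, if_neg hb, if_pos (mul_nonneg ha hpos.le),
      if_neg (by nlinarith : ¬ 0 ≤ b * ((2^n:Nat):Int)),
      hmul a ha, hneg b hb', natMulPow_mask_land]
    have hle0 : (-b-1).toNat &&& a.toNat ≤ (-b-1).toNat := Nat.and_le_left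
    have hle : ((-b-1).toNat &&& a.toNat) * 2^n ≤ (-b-1).toNat * 2^n + (2^n - 1) :=
      le_trans (Nat.mul_le_mul_right _ Nat.and_le_left) (Nat.le_add_right _ _)
    push_cast [Nat.cast_sub hle, Nat.cast_sub hle0, Nat.cast_sub h1]; ring
  · have ha' : a < 0 := by omega
    rw [if_neg ha, if_pos hb, if_neg (by nlinarith : ¬ 0 ≤ a * ((2^n:Nat):Int)),
      if_pos (mul_nonneg hb hpos.le), hmul b hb, hneg a ha', natMulPow_mask_land]
    have hle0 : (-a-1).toNat &&& b.toNat ≤ (-a-1).toNat := Nat.and_le_left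
    have hle : ((-a-1).toNat &&& b.toNat) * 2^n ≤ (-a-1).toNat * 2^n + (2^n - 1) :=
      le_trans (Nat.mul_le_mul_right _ Nat.and_le_left) (Nat.le_add_right _ _)
    push_cast [Nat.cast_sub hle, Nat.cast_sub hle0, Nat.cast_sub h1]; ring
  · have ha' : a < 0 := by omega
    have hb' : b < 0 := by omega
    rw [if_neg ha, if_neg hb, if_neg (by nlinarith : ¬ 0 ≤ a * ((2^n:Nat):Int)),
      if_neg (by nlinarith : ¬ 0 ≤ b * ((2^n:Nat):Int)),
      hneg a ha', hneg b hb', natMulPow_mask_land_mask]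
    push_cast [Nat.cast_sub h1]; ring

theorem nat_and_mod_two (x y : Nat) : (x &&& y) % 2 = x % 2 * (y % 2) := by
  have h := Nat.testBit_and x y 0
  simp only [Nat.testBit_zero] at h
  have h1 : (x &&& y) % 2 = 1 ↔ (x % 2 = 1 ∧ y % 2 = 1) := by
    constructor
    · intro hh
      have : (decide (x % 2 = 1) && decide (y % 2 = 1)) = true := by rw [← h]; simp [hh]
      simpa using this
    · rintro ⟨h2, h3⟩
      have : decide ((x &&& y) % 2 = 1) = true := by rw [h]; simp [h2, h3]
      simpa using this
  rcases Nat.mod_two_eq_zero_or_one x with e1 | e1 <;>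
    rcases Nat.mod_two_eq_zero_or_one y with e2 | e2 <;>
    rw [e1, e2] <;> omega

theorem nat_ldiff_mod_two (x y : Nat) : Nat.ldiff x y % 2 = x % 2 * (1 - y % 2) := by
  have h := Nat.testBit_ldiff x y 0
  simp only [Nat.testBit_zero] at h
  have h1 : Nat.ldiff x y % 2 = 1 ↔ (x % 2 = 1 ∧ y % 2 ≠ 1) := by
    constructor
    · intro hh
      have : (decide (x % 2 = 1) && !decide (y % 2 = 1)) = true := by rw [← h]; simp [hh]
      simpa using this
    · rintro ⟨h2, h3⟩
      have : decide (Nat.ldiff x y % 2 = 1) = true := by rw [h]; simp [h2, h3]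
      simpa using this
  rcases Nat.mod_two_eq_zero_or_one x with e1 | e1 <;>
    rcases Nat.mod_two_eq_zero_or_one y with e2 | e2 <;>
    rw [e1, e2] <;> omega

-- x − (x &&& y) = x &&& ¬y, the form PySem.Int.bor stores negative results in
theorem nat_sub_and (x y : Nat) : x - (x &&& y) = Nat.ldiff x y := by
  induction x using Nat.strong_induction_on generalizing y with
  | _ x ih =>
    match x with
    | 0 =>
      have h0 : Nat.ldiff 0 y = 0 := by
        apply Nat.eq_of_testBit_eq; intro k; simp [Nat.testBit_ldiff]
      simp [h0]
    | x+1 =>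
      have hx : (x+1) / 2 < x + 1 := by omega
      have ihd := ih ((x+1)/2) hx (y/2)
      have hA : ((x+1) &&& y) / 2 = (x+1)/2 &&& y/2 := Nat.and_div_two
      have hL : Nat.ldiff (x+1) y / 2 = Nat.ldiff ((x+1)/2) (y/2) := by
        have := @Nat.bitwise_div_two_pow (fun a b => a && !b) (x+1) y 1 (by simp)
        simpa [Nat.ldiff, Nat.pow_one] using this
      have hAm := nat_and_mod_two (x+1) y
      have hLm := nat_ldiff_mod_two (x+1) y
      have hle : (x+1)/2 &&& y/2 ≤ (x+1)/2 := Nat.and_le_left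
      have d1 := Nat.div_add_mod ((x+1) &&& y) 2
      have d2 := Nat.div_add_mod (Nat.ldiff (x+1) y) 2
      have d3 := Nat.div_add_mod (x+1) 2
      rcases Nat.mod_two_eq_zero_or_one (x+1) with e1 | e1 <;>
        rcases Nat.mod_two_eq_zero_or_one y with e2 | e2 <;>
        rw [e1, e2] at hAm hLm <;> omega

theorem bor_eq_lor (a b : Int) : PySem.Int.bor a b = Int.lor a b := by
  unfold PySem.Int.bor
  cases a with
  | ofNat m =>
    have hm : (0:Int) ≤ Int.ofNat m := Int.ofNat_nonneg m
    cases b with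
    | ofNat n =>
      have hn : (0:Int) ≤ Int.ofNat n := Int.ofNat_nonneg n
      rw [if_pos hm, if_pos hn]
      simp [Int.lor]
    | negSucc n =>
      have hn : ¬ (0:Int) ≤ Int.negSucc n := Int.not_le.mpr (Int.negSucc_lt_zero n)
      rw [if_pos hm, if_neg hn]
      have h2 : (-(Int.negSucc n) - 1) = (n:Int) := by
        rw [Int.negSucc_eq]; ring
      have h3 : (Int.ofNat m).toNat = m := rfl
      rw [h2, Int.toNat_natCast, h3, nat_sub_and, Int.lor]
      rw [Int.negSucc_eq]; ring
  | negSucc m =>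
    have ha : ¬ (0:Int) ≤ Int.negSucc m := Int.not_le.mpr (Int.negSucc_lt_zero m)
    have h2 : (-(Int.negSucc m) - 1) = (m:Int) := by rw [Int.negSucc_eq]; ring
    cases b with
    | ofNat n =>
      have hn : (0:Int) ≤ Int.ofNat n := Int.ofNat_nonneg n
      rw [if_neg ha, if_pos hn, h2, Int.toNat_natCast]
      have h3 : (Int.ofNat n).toNat = n := rfl
      rw [h3, nat_sub_and, Int.lor]
      rw [Int.negSucc_eq]; ring
    | negSucc n =>
      have hb : ¬ (0:Int) ≤ Int.negSucc n := Int.not_le.mpr (Int.negSucc_lt_zero n)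
      have h2' : (-(Int.negSucc n) - 1) = (n:Int) := by rw [Int.negSucc_eq]; ring
      rw [if_neg ha, if_neg hb, h2, h2', Int.toNat_natCast, Int.toNat_natCast, Int.lor]
      rw [Int.negSucc_eq]; ring

theorem int_eq_of_testBit_eq (a b : Int) (h : ∀ k, a.testBit k = b.testBit k) : a = b := by
  cases a with
  | ofNat m =>
    cases b with
    | ofNat n => simp only [Int.testBit] at h; exact congrArg Int.ofNat (Nat.eq_of_testBit_eq h)
    | negSucc n =>
      exfalso
      simp only [Int.testBit] at h
      obtain ⟨k, hm, hn⟩ : ∃ k, m < 2^k ∧ n < 2^k :=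
        ⟨max m n + 1, by have := Nat.lt_two_pow_self (n := max m n + 1); omega,
          by have := Nat.lt_two_pow_self (n := max m n + 1); omega⟩
      have := h k
      rw [Nat.testBit_lt_two_pow hm, Nat.testBit_lt_two_pow hn] at this
      simp at this
  | negSucc m =>
    cases b with
    | ofNat n =>
      exfalso
      simp only [Int.testBit] at h
      obtain ⟨k, hm, hn⟩ : ∃ k, m < 2^k ∧ n < 2^k :=
        ⟨max m n + 1, by have := Nat.lt_two_pow_self (n := max m n + 1); omega,
          by have := Nat.lt_two_pow_self (n := max m n + 1); omega⟩
      have := h k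
      rw [Nat.testBit_lt_two_pow hm, Nat.testBit_lt_two_pow hn] at this
      simp at this
    | negSucc n =>
      simp only [Int.testBit, Bool.not_inj_iff] at h
      exact congrArg Int.negSucc (Nat.eq_of_testBit_eq h)

theorem bor_assoc (a b c : Int) :
    PySem.Int.bor (PySem.Int.bor a b) c = PySem.Int.bor a (PySem.Int.bor b c) := by
  simp only [bor_eq_lor]
  apply int_eq_of_testBit_eq; intro k
  simp [Int.testBit_lor, Bool.or_assoc]

theorem shl_five (a : Int) : a <<< (5:Int) = a <<< (5:Nat) := by
  rw [show ((5:Int)) = ((5:Nat):Int) by norm_num, Int.shiftLeft_natCast_right]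

-- pvPack fs behaves like one combined field: shifting r above it and ORing
-- reproduces A's sequential shift-then-OR fold over the field list.
theorem pack_spec (fs : List (Int × Int)) :
    (∀ p ∈ fs, 0 ≤ p.2) →
    ((pvPack fs).2 = (fs.map Prod.snd).sum ∧
    ∀ r : Int, PySem.Int.bor (r <<< ((pvPack fs).2).toNat) (pvPack fs).1
      = fs.foldl (fun acc vw => PySem.Int.bor (acc <<< vw.2.toNat) vw.1) r) := by
  induction fs using pvPack.induct with
  | case1 =>
    intro h
    refine ⟨by simp [pvPack], fun r => ?_⟩
    simp only [pvPack, List.foldl_nil, Int.toNat_zero, Int.shiftLeft_zero]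
    exact PySem.Int.bor_zero r
  | case2 p =>
    intro h
    refine ⟨by simp [pvPack], fun r => ?_⟩
    simp only [pvPack, List.foldl_cons, List.foldl_nil, Int.shiftLeft_natCast_right]
  | case3 a b rest fs mid ihl ihr =>
    intro h
    have hfs : fs = a :: b :: rest := rfl
    have hmid : mid = fs.length / 2 := rfl
    have hl := ihl (fun p hp => h p (List.mem_of_mem_take hp))
    have hr := ihr (fun p hp => h p (List.mem_of_mem_drop hp))
    have hWl : 0 ≤ (pvPack (fs.take mid)).2 := by
      rw [hl.1]
      exact List.sum_nonneg (by
        rintro x hx; obtain ⟨q, hq, rfl⟩ := List.mem_map.mp hx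
        exact h q (List.mem_of_mem_take hq))
    have hWr : 0 ≤ (pvPack (fs.drop mid)).2 := by
      rw [hr.1]
      exact List.sum_nonneg (by
        rintro x hx; obtain ⟨q, hq, rfl⟩ := List.mem_map.mp hx
        exact h q (List.mem_of_mem_drop hq))
    have hpack : pvPack fs =
        (PySem.Int.bor ((pvPack (fs.take mid)).1 <<< ((pvPack (fs.drop mid)).2).toNat)
          (pvPack (fs.drop mid)).1,
         (pvPack (fs.take mid)).2 + (pvPack (fs.drop mid)).2) := by
      conv_lhs => rw [hfs, pvPack]
    constructor
    · rw [hpack]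
      simp only
      rw [hl.1, hr.1, ← hfs, ← List.sum_append, ← List.map_append, List.take_append_drop]
    · intro r
      have hsplit : fs.foldl (fun acc vw => PySem.Int.bor (acc <<< vw.2.toNat) vw.1) r
          = (fs.drop mid).foldl (fun acc vw => PySem.Int.bor (acc <<< vw.2.toNat) vw.1)
              ((fs.take mid).foldl (fun acc vw => PySem.Int.bor (acc <<< vw.2.toNat) vw.1) r) := by
        conv_lhs => rw [← List.take_append_drop mid fs]
        rw [List.foldl_append]
      have htn : ((pvPack (fs.take mid)).2 + (pvPack (fs.drop mid)).2).toNat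
          = (pvPack (fs.take mid)).2.toNat + (pvPack (fs.drop mid)).2.toNat := by omega
      rw [hsplit, ← hl.2 r, ← hr.2, hpack]
      simp only
      rw [htn, Int.shiftLeft_add, int_bor_shl, ← bor_assoc]

-- ===== VERDICT (by name: the statement is the Claim_ definition above) =====
theorem build_bst_id_spec : Claim_equal_build_bst_id := by
  intro flags zooms values _ hpre
  unfold Spec_build_bst_id
  obtain ⟨hx, hy, hf, ht⟩ := hpre
  unfold pvAxisOK at hx hy hf ht
  unfold build_bst_id build_bst_id_alt
  have i1 : PySem.List.index? ["x","y","f","t"] "x" = some 0 := rfl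
  have i2 : PySem.List.index? ["x","y","f","t"] "y" = some 1 := rfl
  have i3 : PySem.List.index? ["x","y","f","t"] "f" = some 2 := rfl
  have i4 : PySem.List.index? ["x","y","f","t"] "t" = some 3 := rfl
  have e : PySem.List.enumerate ["x","y","f","t"] = [(0,"x"),(1,"y"),(2,"f"),(3,"t")] := rfl
  simp only [i1, i2, i3, i4, e, Option.getD_some, List.filter_cons, List.filter_nil,
    List.foldl_cons, List.foldl_nil, Nat.reduceSub, Int.reduceSub, Int.reduceToNat,
    decide_eq_true_eq, ne_eq, Int.shiftRight_natCast_right]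
  by_cases c3 : PySem.Int.band (flags >>> (3:Nat)) 1 = 0 <;>
  by_cases c2 : PySem.Int.band (flags >>> (2:Nat)) 1 = 0 <;>
  by_cases c1 : PySem.Int.band (flags >>> (1:Nat)) 1 = 0 <;>
  by_cases c0 : PySem.Int.band (flags >>> (0:Nat)) 1 = 0 <;>
  simp only [c3, c2, c1, c0, not_true, not_false_iff, if_true, if_false]
  all_goals rw [(pack_spec _ ?_).2 flags]
  all_goals try simp only [List.map_cons, List.map_nil, List.nil_append, List.cons_append,
    List.append_nil, List.foldl_cons, List.foldl_nil, Int.shiftLeft_natCast_right, shl_five,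
    Int.reduceToNat]
  all_goals try (simp; try rfl)
  all_goals repeat' apply And.intro
  all_goals first
    | exact (hx c3).2.1 | exact (hy c2).2.1 | exact (hf c1).2.1 | exact (ht c0).2.1
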